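-- pv_equiv track=rewrite | github.com/Allnorm/AITronic | utils.py | answer_parser
-- ===== SOURCE A (Python) =====
-- def message_len_parser(text, config, fn_list):
--     max_len = config.get('max_answer_len')
--
--     while len(text) > max_len:
--
--         parsed = False
--
--         for parse_fn in fn_list:
--             for index in range(max_len, 1, -1):
--                 if parse_fn(text, index):
--                     yield text[:index]
--                     text = text[index + 1:]
--                     parsed = True
--                     break
--             if parsed:
--                 break
--         if parsed:
--             continue
--         yield text[:max_len]
--         text = text[max_len:]
--
--     yield text
--
-- def answer_parser(text, config) -> list:
--
--     def lines_parser(txt, index):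
--         return txt[index] == "\n"
--
--     def sentences_parser(txt, index):
--         return txt[index] == " " and txt[index - 1] in ".!?"
--
--     def space_parser(txt, index):
--         return txt[index] == " "
--
--     fn_list = (lines_parser, sentences_parser, space_parser)
--
--     answer = text.split("\n\n") if config.get('split_paragraphs') else [text]
--     split_answer = []
--     for answer_part in answer:
--         split_answer.extend([parsed_txt for parsed_txt in message_len_parser(answer_part, config, fn_list)])
--     return split_answer
-- ===== SOURCE B (Python) =====
-- def _chunks(part, max_len):
--     out = []
--     while len(part) > max_len:
--         nl = sp = st = -1
--         for i in range(max_len, 1, -1):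
--             c = part[i]
--             if c == '\n':
--                 nl = i
--                 break
--             if c == ' ':
--                 if sp < 0:
--                     sp = i
--                 if st < 0 and part[i - 1] in '.!?':
--                     st = i
--         cut = nl if nl >= 0 else st if st >= 0 else sp
--         if cut >= 0:
--             out.append(part[:cut])
--             part = part[cut + 1:]
--         else:
--             out.append(part[:max_len])
--             part = part[max_len:]
--     out.append(part)
--     return out
--
--
-- def answer_parser(text, config) -> list:
--     max_len = config.get('max_answer_len')
--     parts = text.split("\n\n") if config.get('split_paragraphs') else [text]
--     result = []
--     for p in parts:
--         result.extend(_chunks(p, max_len))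
--     return result
-- ===== Notes on version B (the rewrite author's own statement) =====
-- stated objective: alternative
-- what changed: A's inner search runs three separate early-terminating backward scans, one per boundary parser (newline, sentence end, space), re-traversing the index range up to three times per chunk; B makes a single backward pass that records all three candidate cut positions at once and then picks by priority.
-- outside the precondition, e.g. on answer_parser('', {'max_answer_len': 0}): A returns [''], B returns ['']
import Mathlib
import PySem

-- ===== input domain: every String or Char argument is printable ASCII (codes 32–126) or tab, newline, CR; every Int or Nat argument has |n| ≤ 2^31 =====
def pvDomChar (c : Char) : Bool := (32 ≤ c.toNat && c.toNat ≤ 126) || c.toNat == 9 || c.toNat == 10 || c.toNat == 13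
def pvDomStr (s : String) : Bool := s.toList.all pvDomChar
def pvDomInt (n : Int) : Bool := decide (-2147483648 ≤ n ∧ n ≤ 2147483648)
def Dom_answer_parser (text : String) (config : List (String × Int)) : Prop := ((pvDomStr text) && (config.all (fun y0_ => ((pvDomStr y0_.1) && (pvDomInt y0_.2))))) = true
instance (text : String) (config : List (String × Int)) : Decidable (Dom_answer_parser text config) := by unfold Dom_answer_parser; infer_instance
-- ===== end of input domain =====

-- B replaces A's three early-terminating backward scans (one per boundary parser) by a single
-- backward pass that records the three candidate cut positions at once (objective: alternative).

-- ===== PORT A =====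
-- the three parser closures of A (txt[index] ported with pyGet?; the char-in-".!?" test is a
-- membership test on the three chars, exact for the 1-char needle Python tests)
def pvLinesParser (t : List Char) (i : Int) : Bool :=
  PySem.List.pyGet? t i == some '\n'

def pvSentencesParser (t : List Char) (i : Int) : Bool :=
  (PySem.List.pyGet? t i == some ' ') &&
    (match PySem.List.pyGet? t (i - 1) with
     | some c => c == '.' || c == '!' || c == '?'
     | none => false)

def pvSpaceParser (t : List Char) (i : Int) : Bool :=
  PySem.List.pyGet? t i == some ' '

-- A's 'for parse_fn in fn_list: for index in range(max_len, 1, -1): if parse_fn(text, index): … break'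
def pvFindSplitA (t : List Char) (m : Int) : Option Int :=
  [pvLinesParser, pvSentencesParser, pvSpaceParser].findSome?
    (fun fn => (PySem.List.pyRange m 1 (-1)).find? (fn t))

-- A's generator loop 'while len(text) > max_len'; fuel (text.length + 1 at the call) only
-- totalizes the recursion — it suffices whenever max_len ≥ 1 (Pre_); Python diverges otherwise
def pvMlpA (fuel : Nat) (t : List Char) (m : Int) : List (List Char) :=
  match fuel with
  | 0 => [t]
  | fuel + 1 =>
    if (t.length : Int) > m then
      match pvFindSplitA t m with
      | some i =>
        PySem.List.slice t none (some i) :: pvMlpA fuel (PySem.List.slice t (some (i + 1)) none) m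
      | none =>
        PySem.List.slice t none (some m) :: pvMlpA fuel (PySem.List.slice t (some m) none) m
    else [t]

def answer_parser (text : String) (config : List (String × Int)) : List String :=
  match (PySem.Dict.mk config).get? "max_answer_len" with
  | none => []   -- Python raises TypeError ('len(text) > None'); excluded by Pre_
  | some m =>
    let splitP : Bool :=
      match (PySem.Dict.mk config).get? "split_paragraphs" with
      | some v => v != 0
      | none => false
    let answer := if splitP then PySem.Chars.splitOn text.toList ['\n', '\n'] else [text.toList]
    (answer.foldl (fun acc part => acc ++ pvMlpA (part.length + 1) part m) []).map String.ofList

-- ===== PORT B =====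
def pvPrevPunct (t : List Char) (i : Int) : Bool :=
  match PySem.List.pyGet? t (i - 1) with
  | some c => c == '.' || c == '!' || c == '?'
  | none => false

-- B's single backward pass: returns (nl, sp, st), breaking at the first newline
def pvScanB (t : List Char) : List Int → Int → Int → Int × Int × Int
  | [], sp, st => (-1, sp, st)
  | i :: rest, sp, st =>
    match PySem.List.pyGet? t i with
    | some c =>
      if c == '\n' then (i, sp, st)
      else if c == ' ' then
        pvScanB t rest (if sp < 0 then i else sp)
          (if st < 0 && pvPrevPunct t i then i else st)
      else pvScanB t rest sp st
    | none => pvScanB t rest sp st   -- Python IndexError; never reached from pvMlpB's states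

def pvMlpB (fuel : Nat) (t : List Char) (m : Int) : List (List Char) :=
  match fuel with
  | 0 => [t]
  | fuel + 1 =>
    if (t.length : Int) > m then
      let r := pvScanB t (PySem.List.pyRange m 1 (-1)) (-1) (-1)
      let cut : Int := if 0 ≤ r.1 then r.1 else if 0 ≤ r.2.2 then r.2.2 else r.2.1
      if 0 ≤ cut then
        PySem.List.slice t none (some cut) :: pvMlpB fuel (PySem.List.slice t (some (cut + 1)) none) m
      else
        PySem.List.slice t none (some m) :: pvMlpB fuel (PySem.List.slice t (some m) none) m
    else [t]

def answer_parser_alt (text : String) (config : List (String × Int)) : List String :=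
  match (PySem.Dict.mk config).get? "max_answer_len" with
  | none => []   -- same TypeError region as A; excluded by Pre_
  | some m =>
    let splitP : Bool :=
      match (PySem.Dict.mk config).get? "split_paragraphs" with
      | some v => v != 0
      | none => false
    let parts := if splitP then PySem.Chars.splitOn text.toList ['\n', '\n'] else [text.toList]
    (parts.foldl (fun acc part => acc ++ pvMlpB (part.length + 1) part m) []).map String.ofList

-- ===== PRECONDITION & SPEC =====
-- Pre_ excludes configs whose 'max_answer_len' is missing (A raises TypeError) or ≤ 0 (A loops
-- forever on any nonempty paragraph; A returns only on degenerate inputs whose paragraphs are all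
-- empty, e.g. text = "" with max_answer_len = 0).
def Pre_answer_parser (text : String) (config : List (String × Int)) : Prop :=
  (1 : Int) ≤ (((PySem.Dict.mk config).get? "max_answer_len").getD 0)
instance (text : String) (config : List (String × Int)) : Decidable (Pre_answer_parser text config) := by
  unfold Pre_answer_parser; infer_instance

def pvWitness_answer_parser : String × (List (String × Int)) :=
  ("Hi there. How are you?\nGood!", [("max_answer_len", 10), ("split_paragraphs", 1)])

def Spec_answer_parser (text : String) (config : List (String × Int)) (out : List String) : Prop := out = answer_parser_alt text config
instance (text : String) (config : List (String × Int)) (out : List String) : Decidable (Spec_answer_parser text config out) := by unfold Spec_answer_parser; infer_instance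

-- ===== CLAIM (what is proved, stated in full; the proofs are below) =====
def Claim_equal_answer_parser : Prop := ∀ (text : String) (config : List (String × Int)), Dom_answer_parser text config → Pre_answer_parser text config → Spec_answer_parser text config (answer_parser text config)

-- ===== LEMMAS AND PROOFS =====

-- B's final priority choice, as a function of the scan triple (nl, sp, st)
def pvPickOf (r : Int × Int × Int) : Int :=
  if 0 ≤ r.1 then r.1 else if 0 ≤ r.2.2 then r.2.2 else r.2.1

-- A's selection, written as a function of the scan state B threads through its single pass
def pvPick3 (t : List Char) (L : List Int) (sp st : Int) : Int :=
  match L.find? (pvLinesParser t) with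
  | some i => i
  | none =>
    if 0 ≤ st then st else
    match L.find? (pvSentencesParser t) with
    | some j => j
    | none =>
      if 0 ≤ sp then sp else
      match L.find? (pvSpaceParser t) with
      | some k => k
      | none => -1

lemma pvSent_eq_prev (t : List Char) (i : Int) (h : PySem.List.pyGet? t i = some ' ') :
    pvSentencesParser t i = pvPrevPunct t i := by
  simp [pvSentencesParser, pvPrevPunct, h]

lemma pvScan_pick (t : List Char) (L : List Int) :
    ∀ sp st : Int, (∀ i ∈ L, 0 ≤ i) → (sp < 0 → sp = -1) → (st < 0 → st = -1) →
    pvPickOf (pvScanB t L sp st) = pvPick3 t L sp st := by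
  induction L with
  | nil =>
    intro sp st _ hsp hst
    simp only [pvScanB, pvPick3, pvPickOf, List.find?]
    split_ifs <;> omega
  | cons i rest ih =>
    intro sp st hL hsp hst
    have hi : (0 : Int) ≤ i := hL i (by simp)
    have hrest : ∀ j ∈ rest, (0 : Int) ≤ j := fun j hj => hL j (List.mem_cons_of_mem _ hj)
    cases h : PySem.List.pyGet? t i with
    | none =>
      have h1 : pvLinesParser t i = false := by simp [pvLinesParser, h]
      have h2 : pvSentencesParser t i = false := by simp [pvSentencesParser, h]
      have h3 : pvSpaceParser t i = false := by simp [pvSpaceParser, h]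
      have hstep : pvScanB t (i :: rest) sp st = pvScanB t rest sp st := by
        simp [pvScanB, h]
      rw [hstep, pvPick3, List.find?_cons_of_neg (by simp [h1]),
        List.find?_cons_of_neg (by simp [h2]), List.find?_cons_of_neg (by simp [h3]),
        ih sp st hrest hsp hst, pvPick3]
    | some c =>
      by_cases hnl : c = '\n'
      · subst hnl
        have h1 : pvLinesParser t i = true := by simp [pvLinesParser, h]
        have hstep : pvScanB t (i :: rest) sp st = (i, sp, st) := by
          simp [pvScanB, h]
        rw [hstep, pvPick3, List.find?_cons_of_pos (by simp [h1])]
        simp [pvPickOf, hi]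
      · by_cases hspace : c = ' '
        · subst hspace
          have h1 : pvLinesParser t i = false := by simp [pvLinesParser, h]
          have h3 : pvSpaceParser t i = true := by simp [pvSpaceParser, h]
          have hsent : pvSentencesParser t i = pvPrevPunct t i := pvSent_eq_prev t i h
          have hstep : pvScanB t (i :: rest) sp st =
              pvScanB t rest (if sp < 0 then i else sp)
                (if st < 0 && pvPrevPunct t i then i else st) := by
            simp [pvScanB, h]
          have hsp2 : sp = -1 ∨ 0 ≤ sp := by
            by_cases hh : sp < 0
            · exact Or.inl (hsp hh)
            · exact Or.inr (by omega)
          have hst2 : st = -1 ∨ 0 ≤ st := by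
            by_cases hh : st < 0
            · exact Or.inl (hst hh)
            · exact Or.inr (by omega)
          rw [hstep, ih _ _ hrest (by split_ifs <;> omega) (by split_ifs <;> omega)]
          rw [pvPick3, pvPick3, List.find?_cons_of_neg (by simp [h1])]
          by_cases hp : pvPrevPunct t i = true
          · rw [List.find?_cons_of_pos (by simp [hsent, hp])]
            simp only [hp, Bool.and_true, decide_eq_true_eq]
            rcases hfind : rest.find? (pvLinesParser t) with _ | j <;>
              rcases hf2 : rest.find? (pvSentencesParser t) with _ | j2 <;>
                rcases hf3 : rest.find? (pvSpaceParser t) with _ | k <;>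
                  simp only [hfind, hf2, hf3] <;>
                    first
                      | rfl
                      | omega
                      | (split_ifs <;> omega)
          · have hp' : pvPrevPunct t i = false := by simpa using hp
            have h2 : pvSentencesParser t i = false := by rw [hsent, hp']
            rw [List.find?_cons_of_neg (by simp [h2]), List.find?_cons_of_pos (by simp [h3])]
            simp only [hp', Bool.and_false, Bool.false_eq_true, if_false, decide_eq_true_eq]
            rcases hfind : rest.find? (pvLinesParser t) with _ | j <;>
              rcases hf2 : rest.find? (pvSentencesParser t) with _ | j2 <;>
                rcases hf3 : rest.find? (pvSpaceParser t) with _ | k <;>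
                  simp only [hfind, hf2, hf3] <;>
                    first
                      | rfl
                      | omega
                      | (split_ifs <;> omega)
        · -- ordinary char: no parser fires
          have h1 : pvLinesParser t i = false := by simp [pvLinesParser, h, hnl]
          have h2 : pvSentencesParser t i = false := by simp [pvSentencesParser, h, hspace]
          have h3 : pvSpaceParser t i = false := by simp [pvSpaceParser, h, hspace]
          have hstep : pvScanB t (i :: rest) sp st = pvScanB t rest sp st := by
            simp [pvScanB, h, hnl, hspace]
          rw [hstep, pvPick3, List.find?_cons_of_neg (by simp [h1]),
            List.find?_cons_of_neg (by simp [h2]), List.find?_cons_of_neg (by simp [h3]),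
            ih sp st hrest hsp hst, pvPick3]

lemma pvFindSplit_eq (t : List Char) (m : Int) :
    (if 0 ≤ pvPickOf (pvScanB t (PySem.List.pyRange m 1 (-1)) (-1) (-1)) then
       some (pvPickOf (pvScanB t (PySem.List.pyRange m 1 (-1)) (-1) (-1)))
     else none) = pvFindSplitA t m := by
  have hmem : ∀ i ∈ PySem.List.pyRange m 1 (-1), (0 : Int) ≤ i := by
    intro i hi
    have := PySem.List.mem_pyRange_neg_one.mp hi
    omega
  rw [pvScan_pick t _ (-1) (-1) hmem (fun _ => rfl) (fun _ => rfl)]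
  unfold pvFindSplitA pvPick3
  simp only [List.findSome?]
  have hnn : ∀ (p : List Char → Int → Bool) j,
      (PySem.List.pyRange m 1 (-1)).find? (p t) = some j → (0 : Int) ≤ j := by
    intro p j hj
    have := PySem.List.mem_pyRange_neg_one.mp (List.mem_of_find?_eq_some hj)
    omega
  rcases h1 : (PySem.List.pyRange m 1 (-1)).find? (pvLinesParser t) with _ | i
  · rcases h2 : (PySem.List.pyRange m 1 (-1)).find? (pvSentencesParser t) with _ | j
    · rcases h3 : (PySem.List.pyRange m 1 (-1)).find? (pvSpaceParser t) with _ | k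
      · simp
      · have := hnn _ _ h3
        simp [this, if_neg (by omega : ¬ (0:Int) ≤ -1)]
    · have := hnn _ _ h2
      simp [this, if_neg (by omega : ¬ (0:Int) ≤ -1)]
  · have := hnn _ _ h1
    simp [this]

lemma pvMlp_eq (fuel : Nat) : ∀ (t : List Char) (m : Int), pvMlpA fuel t m = pvMlpB fuel t m := by
  induction fuel with
  | zero => intro t m; rfl
  | succ fuel ih =>
    intro t m
    rw [pvMlpA, pvMlpB]
    by_cases hlen : (t.length : Int) > m
    · rw [if_pos hlen, if_pos hlen]
      have hfs := pvFindSplit_eq t m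
      show (match pvFindSplitA t m with
            | some i =>
              PySem.List.slice t none (some i) :: pvMlpA fuel (PySem.List.slice t (some (i + 1)) none) m
            | none =>
              PySem.List.slice t none (some m) :: pvMlpA fuel (PySem.List.slice t (some m) none) m) =
          (if 0 ≤ pvPickOf (pvScanB t (PySem.List.pyRange m 1 (-1)) (-1) (-1)) then
            PySem.List.slice t none (some (pvPickOf (pvScanB t (PySem.List.pyRange m 1 (-1)) (-1) (-1)))) ::
              pvMlpB fuel
                (PySem.List.slice t (some (pvPickOf (pvScanB t (PySem.List.pyRange m 1 (-1)) (-1) (-1)) + 1)) none) m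
          else
            PySem.List.slice t none (some m) :: pvMlpB fuel (PySem.List.slice t (some m) none) m)
      by_cases hc : 0 ≤ pvPickOf (pvScanB t (PySem.List.pyRange m 1 (-1)) (-1) (-1))
      · rw [if_pos hc] at hfs ⊢
        rw [← hfs]
        show PySem.List.slice t none _ :: pvMlpA fuel _ m = _
        rw [ih]
      · rw [if_neg hc] at hfs ⊢
        rw [← hfs]
        show PySem.List.slice t none _ :: pvMlpA fuel _ m = _
        rw [ih]
    · rw [if_neg hlen, if_neg hlen]

-- ===== VERDICT (by name: the statement is the Claim_ definition above) =====
theorem answer_parser_spec : Claim_equal_answer_parser := by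
  intro text config _ _
  unfold Spec_answer_parser answer_parser answer_parser_alt
  rcases (PySem.Dict.mk config).get? "max_answer_len" with _ | m
  · rfl
  · simp only [pvMlp_eq]
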